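-- pv_equiv track=rewrite | github.com/LEEForgiveness/algorithm_study | 0511/3_2.py | dfs
-- ===== SOURCE A (Python) =====
-- dx = [1, 0, -1, 0]
--
-- dy = [0, -1, 0, 1]
--
-- def dfs(graph, visited, x, y):
--     visited[y][x] = 1
--     if graph[y][x] == 0:
--         return 0
--     for i in range(4):
--         nx = x + dx[i]
--         ny = y + dy[i]
--         if 0 <= nx < len(graph) and 0 <= ny < len(graph) and graph[ny][nx] != 0 and visited[ny][nx] == 0:
--             dfs(graph, visited, nx, ny)
--             visited[ny][nx] = visited[y][x] + 1
--     return visited[4][4]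
-- ===== SOURCE B (Python) =====
-- dx = [1, 0, -1, 0]
--
-- dy = [0, -1, 0, 1]
--
-- def dfs(graph, visited, x, y):
--     # Iterative flood fill with an explicit stack (return value matches A's
--     # recursive version; like A it mutates `visited` in place).
--     visited[y][x] = 1
--     if graph[y][x] == 0:
--         return 0
--     n = len(graph)
--     stack = [(x, y)]
--     while stack:
--         cx, cy = stack.pop()
--         for i in range(4):
--             nx = cx + dx[i]
--             ny = cy + dy[i]
--             if 0 <= nx < n and 0 <= ny < n and graph[ny][nx] != 0 and visited[ny][nx] == 0:
--                 visited[ny][nx] = 2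
--                 stack.append((nx, ny))
--     return visited[4][4]
-- ===== Notes on version B (the rewrite author's own statement) =====
-- stated objective: simpler
-- what changed: The recursive DFS with per-child post-increment writes (always writing 2 because the root stays 1) is replaced by an iterative flood fill over an explicit stack that marks each newly reached cell 2 at push time; no recursion, no re-read of the parent cell, same final array and return value.
import Mathlib
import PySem

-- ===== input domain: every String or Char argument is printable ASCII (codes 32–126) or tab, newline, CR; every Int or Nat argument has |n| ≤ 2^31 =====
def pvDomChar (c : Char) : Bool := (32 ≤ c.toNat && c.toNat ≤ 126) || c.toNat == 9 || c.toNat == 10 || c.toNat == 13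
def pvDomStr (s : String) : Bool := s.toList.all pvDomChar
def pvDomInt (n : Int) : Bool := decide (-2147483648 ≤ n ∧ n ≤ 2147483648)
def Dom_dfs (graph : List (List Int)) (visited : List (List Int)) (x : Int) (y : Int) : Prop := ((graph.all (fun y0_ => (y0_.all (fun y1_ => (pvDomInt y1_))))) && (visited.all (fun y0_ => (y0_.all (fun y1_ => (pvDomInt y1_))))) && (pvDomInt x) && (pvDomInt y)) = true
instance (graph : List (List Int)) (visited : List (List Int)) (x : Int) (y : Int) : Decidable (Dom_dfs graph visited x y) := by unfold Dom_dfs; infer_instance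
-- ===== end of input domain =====

-- B replaces A's recursive DFS by an iterative stack flood fill (different control
-- structure, no recursion); both Pythons mutate `visited` in place identically — the
-- equivalence proved here is about the RETURN VALUE (the array is threaded functionally).

-- ===== PORT A =====
def dxL : List Int := [1, 0, -1, 0]
def dyL : List Int := [0, -1, 0, 1]
def gget (m : List (List Int)) (j i : Int) : Option Int :=
  (PySem.List.pyGet? m j).bind (fun r => PySem.List.pyGet? r i)
def gset (m : List (List Int)) (j i : Int) (a : Int) : List (List Int) :=
  PySem.List.pySetD m j (PySem.List.pySetD (PySem.List.pyGetD m j []) i a)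
def zGrid (m : List (List Int)) : Nat := (m.map (fun r => r.countP (fun a => a == 0))).sum
def dfsVisit : Nat → List (List Int) → List (List Int) → Int → Int → List (List Int)
  | 0, _, v, _, _ => v
  | fuel+1, g, v, x, y =>
    let v1 := gset v y x 1
    if (gget g y x).getD 0 = 0 then v1
    else
      (List.range 4).foldl (fun vacc i =>
        let nx := x + dxL.getD i 0
        let ny := y + dyL.getD i 0
        if 0 ≤ nx ∧ nx < (g.length : Int) ∧ 0 ≤ ny ∧ ny < (g.length : Int)
            ∧ (gget g ny nx).getD 0 ≠ 0 ∧ (gget vacc ny nx).getD 1 = 0 then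
          let v' := dfsVisit fuel g vacc nx ny
          gset v' ny nx ((gget v' y x).getD 0 + 1)
        else vacc) v1
def dfs (graph : List (List Int)) (visited : List (List Int)) (x : Int) (y : Int) : Int :=
  if (gget graph y x).getD 0 = 0 then 0
  else (gget (dfsVisit (zGrid visited + 1) graph visited x y) 4 4).getD 0

-- ===== PORT B =====
-- Source B: while stack: pop (cx,cy); for the 4 neighbours in bounds, non-zero and unvisited:
-- mark 2 and push.  Stack top = list head (Python append/pop() is LIFO).
def bLoop : Nat → List (List Int) → Int → List (List Int) → List (Int × Int) → List (List Int)
  | 0, _, _, v, _ => v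
  | fuel+1, g, n, v, stack =>
    match stack with
    | [] => v
    | (cx, cy) :: rest =>
      let st := (List.range 4).foldl (fun (st : List (List Int) × List (Int × Int)) i =>
        let nx := cx + dxL.getD i 0
        let ny := cy + dyL.getD i 0
        if 0 ≤ nx ∧ nx < n ∧ 0 ≤ ny ∧ ny < n
            ∧ (gget g ny nx).getD 0 ≠ 0 ∧ (gget st.1 ny nx).getD 1 = 0 then
          (gset st.1 ny nx 2, (nx, ny) :: st.2)
        else st) (v, rest)
      bLoop fuel g n st.1 st.2
def dfs_alt (graph : List (List Int)) (visited : List (List Int)) (x : Int) (y : Int) : Int :=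
  let v1 := gset visited y x 1
  if (gget graph y x).getD 0 = 0 then 0
  else (gget (bLoop (zGrid visited + 2) graph (graph.length : Int) v1 [(x, y)]) 4 4).getD 0

-- ===== PRECONDITION & SPEC =====
-- Pre_ admits any shapes when the start cell of graph is 0 (A returns 0 at once, only the
-- two start reads must be in range), and otherwise asks for a square n×n graph with a
-- same-shape visited, in-range (possibly negative, Python-style) start indices and n ≥ 5:
-- on other shapes A may hit an IndexError depending on which cells the fill happens to
-- reach (visited[4][4] needs 5 rows/columns), so they are excluded even though some of
-- them happen to return.
def Pre_dfs (graph : List (List Int)) (visited : List (List Int)) (x : Int) (y : Int) : Prop :=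
  (gget graph y x).isSome = true ∧ (gget visited y x).isSome = true ∧
  ((gget graph y x).getD 0 = 0 ∨
    (visited.length = graph.length ∧
     (∀ r ∈ graph, r.length = graph.length) ∧
     (∀ r ∈ visited, r.length = graph.length) ∧
     -(graph.length : Int) ≤ x ∧ x < (graph.length : Int) ∧
     -(graph.length : Int) ≤ y ∧ y < (graph.length : Int) ∧
     5 ≤ graph.length))

instance (graph : List (List Int)) (visited : List (List Int)) (x : Int) (y : Int) : Decidable (Pre_dfs graph visited x y) := by unfold Pre_dfs; infer_instance

def pvWitness_dfs : List (List Int) × List (List Int) × Int × Int :=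
  ([[1,1,0,0,1],[0,1,1,0,1],[0,0,1,1,1],[1,0,0,1,0],[1,1,0,1,1]],
   [[0,0,0,0,0],[0,0,0,0,0],[0,0,0,0,0],[0,0,0,0,0],[0,0,0,0,0]], 0, 0)

def Spec_dfs (graph : List (List Int)) (visited : List (List Int)) (x : Int) (y : Int) (out : Int) : Prop := out = dfs_alt graph visited x y
instance (graph : List (List Int)) (visited : List (List Int)) (x : Int) (y : Int) (out : Int) : Decidable (Spec_dfs graph visited x y out) := by unfold Spec_dfs; infer_instance

-- ===== CLAIM (what is proved, stated in full; the proofs are below) =====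
def Claim_equal_dfs : Prop := ∀ (graph : List (List Int)) (visited : List (List Int)) (x : Int) (y : Int), Dom_dfs graph visited x y → Pre_dfs graph visited x y → Spec_dfs graph visited x y (dfs graph visited x y)

-- ===== LEMMAS AND PROOFS =====

def wrapI (n : Nat) (t : Int) : Int := if t < 0 then t + n else t
def validI (n : Nat) (t : Int) : Prop := -(n : Int) ≤ t ∧ t < (n : Int)

lemma pyIdx_valid (n : Nat) (i : Int) (h : validI n i) :
    PySem.List.pyIdx? n i = some (wrapI n i).toNat := by
  obtain ⟨h1, h2⟩ := h
  by_cases hneg : i < 0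
  · simp only [PySem.List.pyIdx?, wrapI, if_pos hneg, if_neg (by omega : ¬ 0 ≤ i), if_pos h1]
    congr 1; omega
  · simp only [PySem.List.pyIdx?, wrapI, if_neg hneg, if_pos (by omega : 0 ≤ i), if_pos h2]

def shape (n : Nat) (v : List (List Int)) : Prop := v.length = n ∧ ∀ r ∈ v, r.length = n
def cellv (v : List (List Int)) (c : Int × Int) : Int := (gget v c.2 c.1).getD 0
def wrapc (n : Nat) (c : Int × Int) : Int × Int := (wrapI n c.1, wrapI n c.2)
def validc (n : Nat) (c : Int × Int) : Prop := validI n c.1 ∧ validI n c.2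
def inb (n : Nat) (c : Int × Int) : Prop := 0 ≤ c.1 ∧ c.1 < (n : Int) ∧ 0 ≤ c.2 ∧ c.2 < (n : Int)

lemma wrapI_toNat_lt {n : Nat} {t : Int} (h : validI n t) : (wrapI n t).toNat < n := by
  obtain ⟨h1, h2⟩ := h; unfold wrapI; split_ifs <;> omega

lemma gget_valid {n : Nat} {v : List (List Int)} {j i : Int}
    (hs : shape n v) (hj : validI n j) (hi : validI n i) :
    gget v j i = some ((v.getD (wrapI n j).toNat []).getD (wrapI n i).toNat 0) := by
  obtain ⟨hl, hr⟩ := hs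
  have hjw : (wrapI n j).toNat < v.length := by rw [hl]; exact wrapI_toNat_lt hj
  have hrow : v.getD (wrapI n j).toNat [] = v[(wrapI n j).toNat] := List.getD_eq_getElem v [] hjw
  have hrl : (v.getD (wrapI n j).toNat []).length = n := by
    rw [hrow]; exact hr _ (List.getElem_mem hjw)
  have hiw : (wrapI n i).toNat < (v.getD (wrapI n j).toNat []).length := by
    rw [hrl]; exact wrapI_toNat_lt hi
  simp only [gget, PySem.List.pyGet?, hl, pyIdx_valid n j hj, Option.bind_some]
  rw [List.getElem?_eq_getElem hjw, ← hrow]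
  simp only [Option.bind_some, hrl, pyIdx_valid n i hi]
  rw [List.getElem?_eq_getElem hiw, List.getD_eq_getElem _ 0 hiw]

lemma cellv_getD {n : Nat} {v : List (List Int)} {j i : Int} (d : Int)
    (hs : shape n v) (hj : validI n j) (hi : validI n i) :
    (gget v j i).getD d = cellv v (i, j) := by
  simp [cellv, gget_valid hs hj hi]

lemma wrapI_valid_of_valid {n : Nat} {t : Int} (h : validI n t) : validI n (wrapI n t) := by
  obtain ⟨h1, h2⟩ := h; unfold wrapI validI; split_ifs <;> omega

lemma wrapI_idem {n : Nat} {t : Int} (h : validI n t) : wrapI n (wrapI n t) = wrapI n t := by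
  obtain ⟨h1, h2⟩ := h; unfold wrapI; split_ifs <;> omega

lemma cellv_wrap {n : Nat} {v : List (List Int)} {c : Int × Int}
    (hs : shape n v) (hc : validc n c) :
    cellv v c = cellv v (wrapc n c) := by
  obtain ⟨h1, h2⟩ := hc
  simp only [cellv, wrapc]
  rw [gget_valid hs h2 h1, gget_valid hs (wrapI_valid_of_valid h2) (wrapI_valid_of_valid h1),
    wrapI_idem h1, wrapI_idem h2]

lemma gset_valid {n : Nat} {v : List (List Int)} {j i : Int} (a : Int)
    (hs : shape n v) (hj : validI n j) (hi : validI n i) :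
    gset v j i a = v.set (wrapI n j).toNat ((v.getD (wrapI n j).toNat []).set (wrapI n i).toNat a) := by
  obtain ⟨hl, hr⟩ := hs
  have hjw : (wrapI n j).toNat < v.length := by rw [hl]; exact wrapI_toNat_lt hj
  have hrow : v.getD (wrapI n j).toNat [] = v[(wrapI n j).toNat] := List.getD_eq_getElem v [] hjw
  have hrl : (v.getD (wrapI n j).toNat []).length = n := by
    rw [hrow]; exact hr _ (List.getElem_mem hjw)
  simp only [gset, PySem.List.pySetD, PySem.List.pySet?, PySem.List.pyGetD, PySem.List.pyGet?,
    hl, pyIdx_valid n j hj, Option.bind_some]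
  rw [List.getElem?_eq_getElem hjw, ← hrow]
  simp only [Option.getD_some, Option.map_some, hrl, pyIdx_valid n i hi]

lemma shape_set_row {n : Nat} {v : List (List Int)} {k : Nat} {r : List Int}
    (hs : shape n v) (hrl : r.length = n) : shape n (v.set k r) := by
  obtain ⟨hl, hr⟩ := hs
  refine ⟨by simp [hl], ?_⟩
  intro r' hr'
  rcases List.mem_or_eq_of_mem_set hr' with h | h
  · exact hr _ h
  · subst h; exact hrl

lemma shape_gset {n : Nat} {v : List (List Int)} {j i : Int} (a : Int)
    (hs : shape n v) (hj : validI n j) (hi : validI n i) : shape n (gset v j i a) := by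
  rw [gset_valid a hs hj hi]
  refine shape_set_row hs ?_
  rw [List.length_set]
  have hjw : (wrapI n j).toNat < v.length := by rw [hs.1]; exact wrapI_toNat_lt hj
  rw [List.getD_eq_getElem v [] hjw]
  exact hs.2 _ (List.getElem_mem hjw)

lemma wrapI_bounds {n : Nat} {t : Int} (h : validI n t) : 0 ≤ wrapI n t ∧ wrapI n t < n := by
  obtain ⟨h1, h2⟩ := h; unfold wrapI; split_ifs <;> omega

lemma cellv_gset {n : Nat} {v : List (List Int)} {j i : Int} (a : Int) {c : Int × Int}
    (hs : shape n v) (hj : validI n j) (hi : validI n i) (hc : inb n c) :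
    cellv (gset v j i a) c = if c = wrapc n (i, j) then a else cellv v c := by
  obtain ⟨hc1, hc2, hc3, hc4⟩ := hc
  have hvc1 : validI n c.1 := ⟨by omega, hc2⟩
  have hvc2 : validI n c.2 := ⟨by omega, hc4⟩
  have f01 : wrapI n c.1 = c.1 := by unfold wrapI; rw [if_neg (by omega)]
  have f02 : wrapI n c.2 = c.2 := by unfold wrapI; rw [if_neg (by omega)]
  have bi := wrapI_bounds hi
  have bj := wrapI_bounds hj
  have hs' := shape_gset (v := v) a hs hj hi
  rw [cellv, gget_valid hs' hvc2 hvc1, gset_valid a hs hj hi, cellv, gget_valid hs hvc2 hvc1]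
  simp only [Option.getD_some]
  have hjw : (wrapI n j).toNat < v.length := by rw [hs.1]; exact wrapI_toNat_lt hj
  have hrowl : (v.getD (wrapI n j).toNat []).length = n := by
    rw [List.getD_eq_getElem v [] hjw]; exact hs.2 _ (List.getElem_mem hjw)
  have hc2w : (wrapI n c.2).toNat < v.length := by rw [hs.1]; exact wrapI_toNat_lt hvc2
  have hc2w' : (wrapI n c.2).toNat < (v.set (wrapI n j).toNat ((v.getD (wrapI n j).toNat []).set (wrapI n i).toNat a)).length := by
    simpa using hc2w
  rw [List.getD_eq_getElem _ [] hc2w', List.getElem_set]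
  by_cases hjj : (wrapI n j).toNat = (wrapI n c.2).toNat
  · rw [if_pos hjj]
    have hc1w : (wrapI n c.1).toNat < ((v.getD (wrapI n j).toNat []).set (wrapI n i).toNat a).length := by
      rw [List.length_set, hrowl]; exact wrapI_toNat_lt hvc1
    rw [List.getD_eq_getElem _ 0 hc1w, List.getElem_set]
    by_cases hii : (wrapI n i).toNat = (wrapI n c.1).toNat
    · rw [if_pos hii]
      have heq : c = wrapc n (i, j) := by
        have f1 : c.1 = wrapI n i := by omega
        have f2 : c.2 = wrapI n j := by omega
        exact Prod.ext f1 f2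
      rw [if_pos heq]
    · rw [if_neg hii]
      have hne : c ≠ wrapc n (i, j) := by
        intro h
        have h1 : c.1 = wrapI n i := congrArg Prod.fst h
        apply hii; omega
      rw [if_neg hne, ← hjj, List.getD_eq_getElem _ 0 (by rw [hrowl]; exact wrapI_toNat_lt hvc1)]
  · rw [if_neg hjj]
    have hne : c ≠ wrapc n (i, j) := by
      intro h
      have h2 : c.2 = wrapI n j := congrArg Prod.snd h
      apply hjj; omega
    rw [if_neg hne, List.getD_eq_getElem v [] hc2w]

lemma sum_set_nat : ∀ (l : List Nat) (k : Nat) (b : Nat) (h : k < l.length),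
    (l.set k b).sum + l[k]'h = l.sum + b := by
  intro l
  induction l with
  | nil => intro k b h; simp at h
  | cons a t ih =>
      intro k b h
      cases k with
      | zero => simp [List.set]; omega
      | succ k =>
          simp only [List.set, List.sum_cons, List.getElem_cons_succ]
          have := ih k b (by simpa using h)
          omega

lemma countP_set_zero : ∀ (r : List Int) (k : Nat) (a : Int), k < r.length →
    r.getD k 1 = 0 → a ≠ 0 →
    (r.set k a).countP (fun x => x == 0) + 1 = r.countP (fun x => x == 0) := by
  intro r
  induction r with
  | nil => intro k a h; simp at h
  | cons b t ih =>
      intro k a h h0 ha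
      cases k with
      | zero =>
          simp only [List.getD_cons_zero] at h0
          simp [List.set, List.countP_cons, h0, ha]
      | succ k =>
          simp only [List.getD_cons_succ] at h0
          simp only [List.set, List.countP_cons]
          have := ih k a (by simpa using h) h0 ha
          omega

lemma countP_le_pointwise : ∀ (r' r : List Int), r'.length = r.length →
    (∀ k, k < r'.length → r'.getD k 1 = 0 → r.getD k 1 = 0) →
    r'.countP (fun x => x == 0) ≤ r.countP (fun x => x == 0) := by
  intro r'
  induction r' with
  | nil => intro r _ _; simp
  | cons a' t' ih =>
      intro r hlen hp
      cases r with
      | nil => simp at hlen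
      | cons a t =>
          simp only [List.countP_cons]
          have htail := ih t (by simpa using hlen) (fun k hk h0 => by
            have := hp (k+1) (by simpa using Nat.succ_lt_succ hk) (by simpa using h0)
            simpa using this)
          by_cases h0 : a' = 0
          · have := hp 0 (by simp) (by simpa using h0)
            simp only [List.getD_cons_zero] at this
            simp [h0, this]; omega
          · simp only [beq_iff_eq, h0, if_false]
            have : (if a == 0 then 1 else 0) ≥ 0 := by positivity
            omega

lemma zGrid_cons (r : List Int) (t : List (List Int)) :
    zGrid (r :: t) = r.countP (fun x => x == 0) + zGrid t := by
  simp [zGrid]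

lemma zGrid_le_aux : ∀ (w' w : List (List Int)), w'.length = w.length →
    (∀ j, j < w'.length → (w'.getD j []).length = (w.getD j []).length ∧
      ∀ k, k < (w'.getD j []).length → (w'.getD j []).getD k 1 = 0 → (w.getD j []).getD k 1 = 0) →
    zGrid w' ≤ zGrid w := by
  intro w'
  induction w' with
  | nil => intro w _ _; simp [zGrid]
  | cons r' t' ih =>
      intro w hlen hp
      cases w with
      | nil => simp at hlen
      | cons r t =>
          rw [zGrid_cons, zGrid_cons]
          have h0 := hp 0 (by simp)
          simp only [List.getD_cons_zero] at h0
          have hr := countP_le_pointwise r' r h0.1 h0.2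
          have ht := ih t (by simpa using hlen) (fun j hj => by
            have := hp (j+1) (by simpa using Nat.succ_lt_succ hj)
            simpa using this)
          omega

lemma cellv_nat {n : Nat} {v : List (List Int)} (hs : shape n v) {jn kn : Nat}
    (hj : jn < n) (hk : kn < n) :
    cellv v ((kn : Int), (jn : Int)) = (v.getD jn []).getD kn 0 := by
  have hvj : validI n (jn : Int) := ⟨by omega, by exact_mod_cast hj⟩
  have hvk : validI n (kn : Int) := ⟨by omega, by exact_mod_cast hk⟩
  rw [cellv, gget_valid hs hvj hvk]
  simp only [Option.getD_some]
  have w1 : wrapI n (jn : Int) = (jn : Int) := by unfold wrapI; rw [if_neg (by omega)]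
  have w2 : wrapI n (kn : Int) = (kn : Int) := by unfold wrapI; rw [if_neg (by omega)]
  rw [w1, w2, Int.toNat_natCast, Int.toNat_natCast]

lemma zGrid_le_pointwise {n : Nat} {v v' : List (List Int)}
    (hs : shape n v) (hs' : shape n v')
    (h : ∀ c, inb n c → cellv v' c = 0 → cellv v c = 0) :
    zGrid v' ≤ zGrid v := by
  apply zGrid_le_aux v' v (by rw [hs.1, hs'.1])
  intro j hj
  rw [hs'.1] at hj
  have hrow' : v'.getD j [] = v'[j]'(by rw [hs'.1]; exact hj) := List.getD_eq_getElem _ [] _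
  have hrow : v.getD j [] = v[j]'(by rw [hs.1]; exact hj) := List.getD_eq_getElem _ [] _
  have hl' : (v'.getD j []).length = n := by rw [hrow']; exact hs'.2 _ (List.getElem_mem _)
  have hl : (v.getD j []).length = n := by rw [hrow]; exact hs.2 _ (List.getElem_mem _)
  refine ⟨by rw [hl, hl'], ?_⟩
  intro k hk h0
  rw [hl'] at hk
  have hc : inb n ((k : Int), (j : Int)) := by
    refine ⟨by simp, ?_, by simp, ?_⟩
    · show (k : Int) < (n : Int); exact_mod_cast hk
    · show (j : Int) < (n : Int); exact_mod_cast hj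
  have := h _ hc (by
    rw [cellv_nat hs' hj hk]
    rw [List.getD_eq_getElem _ 1 (by omega)] at h0
    rw [List.getD_eq_getElem _ 0 (by omega)]
    exact h0)
  rw [cellv_nat hs hj hk] at this
  rw [List.getD_eq_getElem _ 1 (by rw [hl]; exact hk), ← List.getD_eq_getElem _ 0 (by rw [hl]; exact hk)]
  exact this

lemma zGrid_gset_lt {n : Nat} {v : List (List Int)} {c : Int × Int} {a : Int}
    (hs : shape n v) (hc : inb n c) (h0 : cellv v c = 0) (ha : a ≠ 0) :
    zGrid (gset v c.2 c.1 a) < zGrid v := by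
  obtain ⟨hc1, hc2, hc3, hc4⟩ := hc
  have hvc1 : validI n c.1 := ⟨by omega, hc2⟩
  have hvc2 : validI n c.2 := ⟨by omega, hc4⟩
  rw [gset_valid a hs hvc2 hvc1]
  have w1 : wrapI n c.1 = c.1 := by unfold wrapI; rw [if_neg (by omega)]
  have w2 : wrapI n c.2 = c.2 := by unfold wrapI; rw [if_neg (by omega)]
  rw [w1, w2]
  have hjw : c.2.toNat < v.length := by rw [hs.1]; omega
  have hrow : v.getD c.2.toNat [] = v[c.2.toNat] := List.getD_eq_getElem _ [] hjw
  have hrl : (v.getD c.2.toNat []).length = n := by rw [hrow]; exact hs.2 _ (List.getElem_mem _)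
  have hkw : c.1.toNat < (v.getD c.2.toNat []).length := by rw [hrl]; omega
  -- cell value is row.getD
  have hcell : (v.getD c.2.toNat []).getD c.1.toNat 1 = 0 := by
    have e : cellv v ((c.1.toNat : Int), (c.2.toNat : Int)) = (v.getD c.2.toNat []).getD c.1.toNat 0 :=
      cellv_nat hs (by omega) (by omega)
    have e2 : ((c.1.toNat : Int), (c.2.toNat : Int)) = c := by
      exact Prod.ext (by omega) (by omega)
    rw [e2, h0] at e
    rw [List.getD_eq_getElem _ 1 hkw, ← List.getD_eq_getElem _ 0 hkw]
    exact e.symm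
  have hcount := countP_set_zero (v.getD c.2.toNat []) c.1.toNat a hkw hcell ha
  -- sum over rows
  have hmap : (v.set c.2.toNat ((v.getD c.2.toNat []).set c.1.toNat a)).map (fun r => r.countP (fun x => x == 0))
      = (v.map (fun r => r.countP (fun x => x == 0))).set c.2.toNat (((v.getD c.2.toNat []).set c.1.toNat a).countP (fun x => x == 0)) :=
    List.map_set ..
  have hsum := sum_set_nat (v.map (fun r => r.countP (fun x => x == 0))) c.2.toNat
      (((v.getD c.2.toNat []).set c.1.toNat a).countP (fun x => x == 0)) (by simpa using hjw)
  have hget : (v.map (fun r => r.countP (fun x => x == 0)))[c.2.toNat]'(by simpa using hjw)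
      = (v[c.2.toNat]'hjw).countP (fun x => x == 0) := by
    simp
  rw [hget] at hsum
  show zGrid (v.set c.2.toNat ((v.getD c.2.toNat []).set c.1.toNat a)) < zGrid v
  unfold zGrid
  rw [hmap]
  rw [← hrow] at hsum
  omega

def nbr (c : Int × Int) (i : Nat) : Int × Int := (c.1 + dxL.getD i 0, c.2 + dyL.getD i 0)

lemma inb_validc {n : Nat} {c : Int × Int} (h : inb n c) : validc n c := by
  obtain ⟨h1, h2, h3, h4⟩ := h
  exact ⟨⟨by omega, h2⟩, ⟨by omega, h4⟩⟩

lemma wrapc_inb {n : Nat} {c : Int × Int} (h : inb n c) : wrapc n c = c := by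
  obtain ⟨h1, h2, h3, h4⟩ := h
  unfold wrapc wrapI
  rw [if_neg (by omega), if_neg (by omega)]

lemma validc_wrap_inb {n : Nat} {c : Int × Int} (h : validc n c) : inb n (wrapc n c) := by
  obtain ⟨⟨a1, a2⟩, b1, b2⟩ := h
  unfold wrapc wrapI inb
  constructor
  · split_ifs <;> simp <;> omega
  · refine ⟨?_, ?_, ?_⟩ <;> split_ifs <;> simp <;> omega

lemma nbr_cases {c : Int × Int} {i : Nat} (hi : i < 4) :
    nbr c i = (c.1 + 1, c.2) ∨ nbr c i = (c.1, c.2 - 1) ∨ nbr c i = (c.1 - 1, c.2) ∨ nbr c i = (c.1, c.2 + 1) := by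
  interval_cases i
  · left; simp [nbr, dxL, dyL]
  · right; left; simp [nbr, dxL, dyL]; ring
  · right; right; left; simp [nbr, dxL, dyL]; ring
  · right; right; right; simp [nbr, dxL, dyL]

lemma wrap_ne_nbr {n : Nat} {p : Int × Int} {i : Nat} (hn : 2 ≤ n)
    (hp : validc n p) (hi : i < 4) (hin : inb n (nbr p i)) : nbr p i ≠ wrapc n p := by
  obtain ⟨⟨a1, a2⟩, b1, b2⟩ := hp
  intro he
  rw [show wrapc n p = (wrapI n p.1, wrapI n p.2) from rfl] at he
  obtain ⟨i1, i2, i3, i4⟩ := hin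
  rcases nbr_cases (c := p) hi with h | h | h | h <;> rw [h] at he i1 i2 i3 i4 <;>
    rw [Prod.mk.injEq] at he <;> obtain ⟨e1, e2⟩ := he <;>
    unfold wrapI at e1 e2 <;> split_ifs at e1 e2 <;> dsimp only at i1 i2 i3 i4 <;> omega

def okCell (g u : List (List Int)) (c : Int × Int) : Prop :=
  inb g.length c ∧ cellv g c ≠ 0 ∧ cellv u c = 0

inductive ReachF (g u : List (List Int)) (p : Int × Int) (k : Nat) : Int × Int → Prop
  | base (i : Nat) (hi : i < k) (hok : okCell g u (nbr p i)) : ReachF g u p k (nbr p i)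
  | step (b : Int × Int) (i : Nat) (hi : i < 4) (hb : ReachF g u p k b)
      (hok : okCell g u (nbr b i)) : ReachF g u p k (nbr b i)

lemma reachF_ok {g u : List (List Int)} {p : Int × Int} {k : Nat} {c : Int × Int}
    (h : ReachF g u p k c) : okCell g u c := by
  cases h <;> assumption

lemma reachF_mono {g u : List (List Int)} {p : Int × Int} {k : Nat} {c : Int × Int}
    (h : ReachF g u p k c) : ReachF g u p (k + 1) c := by
  induction h with
  | base i hi hok => exact ReachF.base i (by omega) hok
  | step b i hi hb hok ih => exact ReachF.step b i hi ih hok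

lemma reachF_succ_of_not_new {g u : List (List Int)} {p : Int × Int} {k : Nat}
    (hnew : okCell g u (nbr p k) → ReachF g u p k (nbr p k)) :
    ∀ c, ReachF g u p (k + 1) c → ReachF g u p k c := by
  intro c h
  induction h with
  | base i hi hok =>
      rcases Nat.lt_succ_iff_lt_or_eq.mp hi with h' | h'
      · exact ReachF.base i h' hok
      · subst h'; exact hnew hok
  | step b i hi hb hok ih => exact ReachF.step b i hi ih hok

lemma reach_split {g u u' : List (List Int)} {p child : Int × Int} {k : Nat}
    (hk : k < 4) (hchild : child = nbr p k) (hok : okCell g u child)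
    (hnotk : ¬ ReachF g u p k child)
    (hz : ∀ c, inb g.length c →
      (cellv u' c = 0 ↔ (cellv u c = 0 ∧ ¬ ReachF g u p k c ∧ c ≠ child))) :
    ∀ c, ReachF g u p (k + 1) c ↔
      (ReachF g u p k c ∨ c = child ∨ ReachF g u' child 4 c) := by
  have gval_ok : ∀ c, okCell g u' c → okCell g u c ∧ ¬ ReachF g u p k c ∧ c ≠ child := by
    intro c ⟨h1, h2, h3⟩
    have := (hz c h1).mp h3
    exact ⟨⟨h1, h2, this.1⟩, this.2.1, this.2.2⟩
  have ok_to' : ∀ c, okCell g u c → ¬ ReachF g u p k c → c ≠ child → okCell g u' c := by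
    intro c ⟨h1, h2, h3⟩ h4 h5
    exact ⟨h1, h2, (hz c h1).mpr ⟨h3, h4, h5⟩⟩
  intro c
  constructor
  · intro h
    induction h with
    | base i hi hok' =>
        rcases Nat.lt_succ_iff_lt_or_eq.mp hi with h' | h'
        · exact Or.inl (ReachF.base i h' hok')
        · subst h'; exact Or.inr (Or.inl hchild.symm)
    | step b i hi hb hok' ih =>
        rcases ih with hb' | hb' | hb'
        · exact Or.inl (ReachF.step b i hi hb' hok')
        · -- b = child
          by_cases hS : ReachF g u p k (nbr b i)
          · exact Or.inl hS
          · by_cases hc : nbr b i = child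
            · exact Or.inr (Or.inl hc)
            · refine Or.inr (Or.inr ?_)
              rw [hb'] at hok' hS hc ⊢
              exact ReachF.base i hi (ok_to' _ hok' hS hc)
        · by_cases hS : ReachF g u p k (nbr b i)
          · exact Or.inl hS
          · by_cases hc : nbr b i = child
            · exact Or.inr (Or.inl hc)
            · exact Or.inr (Or.inr (ReachF.step b i hi hb' (ok_to' _ hok' hS hc)))
  · intro h
    rcases h with h | h | h
    · exact reachF_mono h
    · rw [h, hchild]; exact ReachF.base k (by omega) (by rw [← hchild]; exact hok)
    · induction h with
      | base i hi hok' =>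
          have := gval_ok _ (reachF_ok (ReachF.base i hi hok'))
          have hcb : ReachF g u p (k+1) child := by
            rw [hchild]; exact ReachF.base k (by omega) (by rw [← hchild]; exact hok)
          exact ReachF.step child i hi hcb ⟨hok'.1, hok'.2.1, (this.1).2.2⟩
      | step b i hi hb hok' ih =>
          have := gval_ok _ (reachF_ok (ReachF.step b i hi hb hok'))
          exact ReachF.step b i hi ih ⟨hok'.1, hok'.2.1, (this.1).2.2⟩

def abody (fuel : Nat) (g : List (List Int)) (x y : Int) (vacc : List (List Int)) (i : Nat) : List (List Int) :=
  let nx := x + dxL.getD i 0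
  let ny := y + dyL.getD i 0
  if 0 ≤ nx ∧ nx < (g.length : Int) ∧ 0 ≤ ny ∧ ny < (g.length : Int)
      ∧ (gget g ny nx).getD 0 ≠ 0 ∧ (gget vacc ny nx).getD 1 = 0 then
    let v' := dfsVisit fuel g vacc nx ny
    gset v' ny nx ((gget v' y x).getD 0 + 1)
  else vacc

def charF (g u v : List (List Int)) (p : Int × Int) (k : Nat) : Prop :=
  ∀ c, inb g.length c →
    (ReachF g u p k c → cellv v c = 2) ∧ (¬ ReachF g u p k c → cellv v c = cellv u c)

def Aconc (g : List (List Int)) (fuel : Nat) (v : List (List Int)) (p : Int × Int) : Prop :=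
  shape g.length (dfsVisit fuel g v p.1 p.2) ∧
  ∀ c, inb g.length c →
    (c = wrapc g.length p → cellv (dfsVisit fuel g v p.1 p.2) c = 1) ∧
    (c ≠ wrapc g.length p → ReachF g (gset v p.2 p.1 1) p 4 c →
        cellv (dfsVisit fuel g v p.1 p.2) c = 2) ∧
    (c ≠ wrapc g.length p → ¬ ReachF g (gset v p.2 p.1 1) p 4 c →
        cellv (dfsVisit fuel g v p.1 p.2) c = cellv (gset v p.2 p.1 1) c)

lemma reachF_zero {g u : List (List Int)} {p c : Int × Int} (h : ReachF g u p 0 c) : False := by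
  induction h with
  | base i hi hok => omega
  | step b i hi hb hok ih => exact ih

lemma zGrid_le_of_charF {g u v : List (List Int)} {p : Int × Int} {k : Nat}
    (hsu : shape g.length u) (hsv : shape g.length v) (hchar : charF g u v p k) :
    zGrid v ≤ zGrid u := by
  apply zGrid_le_pointwise hsu hsv
  intro c hc h0
  by_cases hR : ReachF g u p k c
  · have := (hchar c hc).1 hR; omega
  · have := (hchar c hc).2 hR; omega

lemma stepA (g : List (List Int)) (hn : 2 ≤ g.length) (fuel : Nat)
    (IH : ∀ v (q : Int × Int), shape g.length v → validc g.length q → cellv g q ≠ 0 →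
      zGrid (gset v q.2 q.1 1) < fuel → Aconc g fuel v q)
    (u v : List (List Int)) (p : Int × Int) (k : Nat) (hk : k < 4)
    (hsu : shape g.length u) (hp : validc g.length p)
    (hwu : cellv u (wrapc g.length p) = 1)
    (hsv : shape g.length v)
    (hchar : charF g u v p k)
    (hZ : zGrid u ≤ fuel) :
    shape g.length (abody fuel g p.1 p.2 v k) ∧ charF g u (abody fuel g p.1 p.2 v k) p (k + 1) := by
  set n := g.length with hn_def
  have hzv : zGrid v ≤ zGrid u := zGrid_le_of_charF hsu hsv hchar
  -- the neighbour cell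
  have hchild : nbr p k = (p.1 + dxL.getD k 0, p.2 + dyL.getD k 0) := rfl
  set child := nbr p k with hchild_def
  by_cases hC : 0 ≤ p.1 + dxL.getD k 0 ∧ p.1 + dxL.getD k 0 < (g.length : Int)
      ∧ 0 ≤ p.2 + dyL.getD k 0 ∧ p.2 + dyL.getD k 0 < (g.length : Int)
      ∧ (gget g (p.2 + dyL.getD k 0) (p.1 + dxL.getD k 0)).getD 0 ≠ 0
      ∧ (gget v (p.2 + dyL.getD k 0) (p.1 + dxL.getD k 0)).getD 1 = 0
  · -- the branch is taken: recurse into child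
    obtain ⟨c1, c2, c3, c4, c5, c6⟩ := hC
    have hinb : inb n child := ⟨c1, c2, c3, c4⟩
    have hvch : validc n child := inb_validc hinb
    have hwch : wrapc n child = child := wrapc_inb hinb
    have hgch : cellv g child ≠ 0 := c5
    have hv0 : cellv v child = 0 := by
      have := cellv_getD (v := v) (j := p.2 + dyL.getD k 0) (i := p.1 + dxL.getD k 0) 1 hsv hvch.2 hvch.1
      rw [this] at c6; exact c6
    have hnotk : ¬ ReachF g u p k child := by
      intro h
      have := (hchar child hinb).1 h
      omega
    have hu0 : cellv u child = 0 := by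
      have := (hchar child hinb).2 hnotk
      omega
    have hokch : okCell g u child := ⟨hinb, hgch, hu0⟩
    -- recursion
    have hfuel' : zGrid (gset v child.2 child.1 1) < fuel := by
      have := zGrid_gset_lt (a := 1) hsv hinb hv0 (by norm_num)
      omega
    have hA := IH v child hsv hvch hgch hfuel'
    set v' := dfsVisit fuel g v child.1 child.2 with hv'_def
    obtain ⟨hsv', hAc⟩ := hA
    set u' := gset v child.2 child.1 1 with hu'_def
    have hsu' : shape n u' := shape_gset 1 hsv hvch.2 hvch.1
    -- the zero characterisation of u'
    have hz : ∀ c, inb n c →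
        (cellv u' c = 0 ↔ (cellv u c = 0 ∧ ¬ ReachF g u p k c ∧ c ≠ child)) := by
      intro c hc
      have e : cellv u' c = if c = wrapc n (child.1, child.2) then 1 else cellv v c :=
        cellv_gset 1 hsv hvch.2 hvch.1 hc
      have e2 : wrapc n (child.1, child.2) = child := hwch
      rw [e2] at e
      by_cases hcc : c = child
      · rw [if_pos hcc] at e
        constructor
        · intro h; omega
        · intro ⟨_, _, h3⟩; exact absurd hcc h3
      · rw [if_neg hcc] at e
        by_cases hR : ReachF g u p k c
        · have := (hchar c hc).1 hR
          constructor
          · intro h; omega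
          · intro ⟨_, h2, _⟩; exact absurd hR h2
        · have := (hchar c hc).2 hR
          constructor
          · intro h; exact ⟨by omega, hR, hcc⟩
          · intro ⟨h1, _, _⟩; omega
    have hsplit := reach_split hk rfl hokch hnotk hz
    -- the parent's own cell reads 1
    have hw_in : inb n (wrapc n p) := validc_wrap_inb hp
    have hwneq : child ≠ wrapc n p := wrap_ne_nbr hn hp hk hinb
    have hnRw : ¬ ReachF g u p k (wrapc n p) := by
      intro h
      have := (reachF_ok h).2.2
      omega
    have hvw : cellv v (wrapc n p) = 1 := by
      have := (hchar _ hw_in).2 hnRw; omega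
    have hu'w : cellv u' (wrapc n p) = 1 := by
      have e : cellv u' (wrapc n p) = if wrapc n p = wrapc n (child.1, child.2) then 1 else cellv v (wrapc n p) :=
        cellv_gset 1 hsv hvch.2 hvch.1 hw_in
      rw [hwch, if_neg (fun h => hwneq h.symm)] at e
      omega
    have hnR'w : ¬ ReachF g u' child 4 (wrapc n p) := by
      intro h
      have := (reachF_ok h).2.2
      omega
    have hv'w : cellv v' (wrapc n p) = 1 := by
      have h3 := ((hAc _ hw_in).2.2 (by rw [hwch]; exact fun h => hwneq h.symm)) hnR'w
      rw [h3]; exact hu'w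
    have hval : cellv v' p = 1 := (cellv_wrap hsv' hp).trans hv'w
    -- the result of this step
    have hres : abody fuel g p.1 p.2 v k =
        gset v' child.2 child.1 ((gget v' p.2 p.1).getD 0 + 1) := by
      simp only [abody]
      rw [if_pos ⟨c1, c2, c3, c4, c5, c6⟩]
      rfl
    have hval2 : (gget v' p.2 p.1).getD 0 + 1 = (2 : Int) := by
      have : cellv v' p = (gget v' p.2 p.1).getD 0 := rfl
      omega
    rw [hres, hval2]
    have hsres : shape n (gset v' child.2 child.1 2) := shape_gset 2 hsv' hvch.2 hvch.1
    refine ⟨hsres, ?_⟩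
    intro c hc
    have hrc : cellv (gset v' child.2 child.1 2) c = if c = child then 2 else cellv v' c := by
      have e := cellv_gset 2 hsv' hvch.2 hvch.1 hc
      rw [show wrapc n (child.1, child.2) = child from hwch] at e
      exact e
    have hu'c : c ≠ child → cellv u' c = cellv v c := by
      intro hcc
      have e := cellv_gset 1 hsv hvch.2 hvch.1 hc
      rw [show wrapc n (child.1, child.2) = child from hwch, if_neg hcc] at e
      exact e
    constructor
    · intro hR1
      rcases (hsplit c).mp hR1 with hRk | hceq | hR'
      · by_cases hcc : c = child
        · rw [hrc, if_pos hcc]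
        · rw [hrc, if_neg hcc]
          by_cases hR' : ReachF g u' child 4 c
          · exact ((hAc c hc).2.1 (by rw [hwch]; exact hcc)) hR'
          · have h3 := ((hAc c hc).2.2 (by rw [hwch]; exact hcc)) hR'
            rw [h3, hu'c hcc]
            exact (hchar c hc).1 hRk
      · rw [hrc, if_pos hceq]
      · by_cases hcc : c = child
        · rw [hrc, if_pos hcc]
        · rw [hrc, if_neg hcc]
          exact ((hAc c hc).2.1 (by rw [hwch]; exact hcc)) hR'
    · intro hnR1
      have hcc : c ≠ child := by
        intro h
        exact hnR1 ((hsplit c).mpr (Or.inr (Or.inl h)))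
      have hnRk : ¬ ReachF g u p k c := fun h => hnR1 (reachF_mono h)
      have hnR' : ¬ ReachF g u' child 4 c := fun h => hnR1 ((hsplit c).mpr (Or.inr (Or.inr h)))
      rw [hrc, if_neg hcc]
      have h3 := ((hAc c hc).2.2 (by rw [hwch]; exact hcc)) hnR'
      rw [h3, hu'c hcc]
      exact (hchar c hc).2 hnRk
  · -- branch not taken
    have hres : abody fuel g p.1 p.2 v k = v := by
      simp only [abody]
      rw [if_neg hC]
    rw [hres]
    refine ⟨hsv, ?_⟩
    have hnew : okCell g u child → ReachF g u p k child := by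
      intro hok
      by_contra hnR
      have hv0 : cellv v child = 0 := by
        have := (hchar child hok.1).2 hnR
        have h2 := hok.2.2
        omega
      obtain ⟨i1, i2, i3, i4⟩ := hok.1
      apply hC
      refine ⟨i1, i2, i3, i4, hok.2.1, ?_⟩
      have := cellv_getD (v := v) (j := p.2 + dyL.getD k 0) (i := p.1 + dxL.getD k 0) 1 hsv
        (inb_validc hok.1).2 (inb_validc hok.1).1
      rw [this]
      exact hv0
    intro c hc
    constructor
    · intro hR1
      exact (hchar c hc).1 (reachF_succ_of_not_new hnew c hR1)
    · intro hnR1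
      exact (hchar c hc).2 (fun h => hnR1 (reachF_mono h))

lemma visit_spec (g : List (List Int)) (hn : 2 ≤ g.length) :
    ∀ fuel (v : List (List Int)) (p : Int × Int),
      shape g.length v → validc g.length p → cellv g p ≠ 0 →
      zGrid (gset v p.2 p.1 1) < fuel → Aconc g fuel v p := by
  intro fuel
  induction fuel with
  | zero => intro v p _ _ _ h; omega
  | succ fuel ih =>
      intro v p hsv hp hg hfuel
      set n := g.length with hndef
      set u := gset v p.2 p.1 1 with hu
      have hsu : shape n u := shape_gset 1 hsv hp.2 hp.1
      have hw_in : inb n (wrapc n p) := validc_wrap_inb hp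
      have hwu : cellv u (wrapc n p) = 1 := by
        have e := cellv_gset (v := v) (j := p.2) (i := p.1) 1 hsv hp.2 hp.1 hw_in
        rw [if_pos (show wrapc n p = wrapc n (p.1, p.2) from rfl)] at e
        exact e
      have hchar0 : charF g u u p 0 := by
        intro c hc
        exact ⟨fun h => absurd h (fun h' => reachF_zero h'), fun _ => rfl⟩
      have hunf : dfsVisit (fuel + 1) g v p.1 p.2 =
          abody fuel g p.1 p.2 (abody fuel g p.1 p.2 (abody fuel g p.1 p.2 (abody fuel g p.1 p.2 u 0) 1) 2) 3 := by
        rw [dfsVisit]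
        rw [if_neg (show ¬((gget g p.2 p.1).getD 0 = 0) from hg)]
        rfl
      have hZ : zGrid u ≤ fuel := by omega
      have h1 := stepA g hn fuel ih u u p 0 (by omega) hsu hp hwu hsu hchar0 hZ
      have h2 := stepA g hn fuel ih u _ p 1 (by omega) hsu hp hwu h1.1 h1.2 hZ
      have h3 := stepA g hn fuel ih u _ p 2 (by omega) hsu hp hwu h2.1 h2.2 hZ
      have h4 := stepA g hn fuel ih u _ p 3 (by omega) hsu hp hwu h3.1 h3.2 hZ
      constructor
      · rw [hunf]; exact h4.1
      · intro c hc
        have hR4 := h4.2 c hc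
        refine ⟨?_, ?_, ?_⟩
        · intro hcw
          have hnR : ¬ ReachF g u p 4 c := by
            intro h
            have h2 := (reachF_ok h).2.2
            rw [hcw, hwu] at h2
            exact absurd h2 (by norm_num)
          rw [hunf]
          rw [hR4.2 hnR, hcw]
          exact hwu
        · intro _ hR
          rw [hunf]
          exact hR4.1 hR
        · intro _ hnR
          rw [hunf]
          exact hR4.2 hnR

def bbody (g : List (List Int)) (n : Int) (cx cy : Int) (st : List (List Int) × List (Int × Int)) (i : Nat) :
    List (List Int) × List (Int × Int) :=
  let nx := cx + dxL.getD i 0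
  let ny := cy + dyL.getD i 0
  if 0 ≤ nx ∧ nx < n ∧ 0 ≤ ny ∧ ny < n
      ∧ (gget g ny nx).getD 0 ≠ 0 ∧ (gget st.1 ny nx).getD 1 = 0 then
    (gset st.1 ny nx 2, (nx, ny) :: st.2)
  else st

lemma stepB (g u : List (List Int)) (p : Int × Int) (hn : 2 ≤ g.length)
    (hp : validc g.length p) (hsu : shape g.length u)
    (hwu : cellv u (wrapc g.length p) = 1)
    (q : Int × Int) (k : Nat) (hk : k < 4) (B : Nat)
    (v : List (List Int)) (stk : List (Int × Int)) (S : Int × Int → Prop)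
    (hq : q = p ∨ S q)
    (B1 : shape g.length v)
    (B2 : ∀ c, inb g.length c → (S c → cellv v c = 2) ∧ (¬ S c → cellv v c = cellv u c))
    (B3 : ∀ c, S c → okCell g u c ∧ ReachF g u p 4 c)
    (B4 : (q :: stk).Nodup)
    (B5 : ∀ s ∈ stk, s = p ∨ S s)
    (B6 : ∀ c, (c = p ∨ S c) → c ∉ (q :: stk) → ∀ i, i < 4 → okCell g u (nbr c i) → S (nbr c i))
    (B7 : ∀ i, i < k → okCell g u (nbr q i) → S (nbr q i))
    (B8 : zGrid v + stk.length ≤ B) :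
    ∃ S' : Int × Int → Prop, (∀ c, S c → S' c) ∧
      (shape g.length (bbody g (g.length : Int) q.1 q.2 (v, stk) k).1) ∧
      (∀ c, inb g.length c → (S' c → cellv (bbody g (g.length : Int) q.1 q.2 (v, stk) k).1 c = 2) ∧
        (¬ S' c → cellv (bbody g (g.length : Int) q.1 q.2 (v, stk) k).1 c = cellv u c)) ∧
      (∀ c, S' c → okCell g u c ∧ ReachF g u p 4 c) ∧
      ((q :: (bbody g (g.length : Int) q.1 q.2 (v, stk) k).2).Nodup) ∧
      (∀ s ∈ (bbody g (g.length : Int) q.1 q.2 (v, stk) k).2, s = p ∨ S' s) ∧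
      (∀ c, (c = p ∨ S' c) → c ∉ (q :: (bbody g (g.length : Int) q.1 q.2 (v, stk) k).2) →
        ∀ i, i < 4 → okCell g u (nbr c i) → S' (nbr c i)) ∧
      (∀ i, i < k + 1 → okCell g u (nbr q i) → S' (nbr q i)) ∧
      (zGrid (bbody g (g.length : Int) q.1 q.2 (v, stk) k).1 + (bbody g (g.length : Int) q.1 q.2 (v, stk) k).2.length ≤ B) := by
  set n := g.length with hndef
  set child := nbr q k with hchild_def
  have hqv : cellv v (wrapc n p) = 1 := by
    have hnS : ¬ S (wrapc n p) := by
      intro h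
      have := (B3 _ h).1.2.2
      omega
    have := (B2 _ (validc_wrap_inb hp)).2 hnS
    omega
  by_cases hC : 0 ≤ q.1 + dxL.getD k 0 ∧ q.1 + dxL.getD k 0 < (n : Int)
      ∧ 0 ≤ q.2 + dyL.getD k 0 ∧ q.2 + dyL.getD k 0 < (n : Int)
      ∧ (gget g (q.2 + dyL.getD k 0) (q.1 + dxL.getD k 0)).getD 0 ≠ 0
      ∧ (gget v (q.2 + dyL.getD k 0) (q.1 + dxL.getD k 0)).getD 1 = 0
  · obtain ⟨c1, c2, c3, c4, c5, c6⟩ := hC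
    have hres : bbody g (n : Int) q.1 q.2 (v, stk) k = (gset v (q.2 + dyL.getD k 0) (q.1 + dxL.getD k 0) 2, (q.1 + dxL.getD k 0, q.2 + dyL.getD k 0) :: stk) := by
      simp only [bbody]
      rw [if_pos ⟨c1, c2, c3, c4, c5, c6⟩]
    have hinb : inb n child := ⟨c1, c2, c3, c4⟩
    have hvch : validc n child := inb_validc hinb
    have hwch : wrapc n child = child := wrapc_inb hinb
    have hv0 : cellv v child = 0 := by
      have := cellv_getD (v := v) (j := q.2 + dyL.getD k 0) (i := q.1 + dxL.getD k 0) 1 B1 hvch.2 hvch.1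
      rw [this] at c6; exact c6
    have hnS : ¬ S child := by
      intro h
      have := (B2 child hinb).1 h
      omega
    have hu0 : cellv u child = 0 := by
      have := (B2 child hinb).2 hnS
      omega
    have hok : okCell g u child := ⟨hinb, c5, hu0⟩
    have hRch : ReachF g u p 4 child := by
      rcases hq with rfl | hSq
      · exact ReachF.base k hk hok
      · exact ReachF.step q k hk (B3 q hSq).2 hok
    have hchne : ∀ s, s = p ∨ S s → child ≠ s := by
      intro s hs hne
      rcases hs with hsp | hSs
      · have h2 : cellv v (wrapc n child) = cellv v (wrapc n p) := by rw [hne, hsp]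
        rw [hwch] at h2
        omega
      · have := (B2 child hinb).1 (by rw [hne]; exact hSs)
        omega
    refine ⟨fun c => S c ∨ c = child, fun c h => Or.inl h, ?_⟩
    rw [hres]
    have hcell : ∀ c, inb n c → cellv (gset v (q.2 + dyL.getD k 0) (q.1 + dxL.getD k 0) 2) c
        = if c = child then 2 else cellv v c := by
      intro c hc
      have e := cellv_gset 2 B1 hvch.2 hvch.1 hc
      rw [show wrapc n (child.1, child.2) = child from hwch] at e
      exact e
    refine ⟨shape_gset 2 B1 hvch.2 hvch.1, ?_, ?_, ?_, ?_, ?_, ?_, ?_⟩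
    · intro c hc
      rw [hcell c hc]
      constructor
      · intro h
        rcases h with h | rfl
        · by_cases hcc : c = child
          · rw [if_pos hcc]
          · rw [if_neg hcc]; exact (B2 c hc).1 h
        · rw [if_pos rfl]
      · intro h
        push_neg at h
        rw [if_neg h.2]
        exact (B2 c hc).2 h.1
    · intro c h
      rcases h with h | rfl
      · exact B3 c h
      · exact ⟨hok, hRch⟩
    · show (q :: (q.1 + dxL.getD k 0, q.2 + dyL.getD k 0) :: stk).Nodup
      have hqstk := B4
      rw [List.nodup_cons] at hqstk
      rw [List.nodup_cons, List.nodup_cons]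
      refine ⟨?_, ?_, hqstk.2⟩
      · intro hmem
        rcases List.mem_cons.mp hmem with h | h
        · exact hchne q hq h.symm
        · exact hqstk.1 h
      · intro hmem
        rcases B5 _ hmem with h | h
        · exact hchne _ (Or.inl h) rfl
        · exact hchne _ (Or.inr h) rfl
    · intro s hs
      rcases List.mem_cons.mp hs with rfl | h
      · exact Or.inr (Or.inr rfl)
      · rcases B5 _ h with h' | h'
        · exact Or.inl h'
        · exact Or.inr (Or.inl h')
    · intro c hcp hcn i hi hoki
      have hcch : c ≠ child := by
        intro rfl'
        exact hcn (List.mem_cons.mpr (Or.inr (List.mem_cons.mpr (Or.inl rfl'))))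
      have hcp' : c = p ∨ S c := by
        rcases hcp with h | h | h
        · exact Or.inl h
        · exact Or.inr h
        · exact absurd h hcch
      have hcn' : c ∉ (q :: stk) := by
        intro hmem
        rcases List.mem_cons.mp hmem with h | h
        · exact hcn (List.mem_cons.mpr (Or.inl h))
        · exact hcn (List.mem_cons.mpr (Or.inr (List.mem_cons.mpr (Or.inr h))))
      exact Or.inl (B6 c hcp' hcn' i hi hoki)
    · intro i hi hoki
      rcases Nat.lt_succ_iff_lt_or_eq.mp hi with hlt | heq
      · exact Or.inl (B7 i hlt hoki)
      · rw [heq]; exact Or.inr rfl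
    · show zGrid (gset v (q.2 + dyL.getD k 0) (q.1 + dxL.getD k 0) 2) + (stk.length + 1) ≤ B
      have := zGrid_gset_lt (a := 2) (c := child) B1 hinb hv0 (by norm_num)
      have h2 : gset v child.2 child.1 2 = gset v (q.2 + dyL.getD k 0) (q.1 + dxL.getD k 0) 2 := rfl
      rw [h2] at this
      omega
  · have hres : bbody g ((g.length : Nat) : Int) q.1 q.2 (v, stk) k = (v, stk) := by
      simp only [bbody]
      rw [if_neg hC]
    refine ⟨S, fun c h => h, ?_⟩
    rw [hres]
    refine ⟨B1, B2, B3, B4, B5, ?_, ?_, B8⟩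
    · intro c hcp hcn i hi hoki
      exact B6 c hcp hcn i hi hoki
    · intro i hi hoki
      rcases Nat.lt_succ_iff_lt_or_eq.mp hi with hlt | heq
      · exact B7 i hlt hoki
      · rw [heq] at hoki ⊢
        by_contra hnS
        obtain ⟨hinb', hgch, hu0⟩ := hoki
        obtain ⟨i1, i2, i3, i4⟩ := hinb'
        apply hC
        refine ⟨i1, i2, i3, i4, hgch, ?_⟩
        have hvv : cellv v (nbr q k) = 0 := by
          have := (B2 _ ⟨i1, i2, i3, i4⟩).2 hnS
          omega
        have e := cellv_getD (v := v) (j := q.2 + dyL.getD k 0) (i := q.1 + dxL.getD k 0) 1 B1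
          (inb_validc ⟨i1, i2, i3, i4⟩).2 (inb_validc ⟨i1, i2, i3, i4⟩).1
        rw [e]
        exact hvv

lemma bloop_spec (g u : List (List Int)) (p : Int × Int) (hn : 2 ≤ g.length)
    (hp : validc g.length p) (hsu : shape g.length u)
    (hwu : cellv u (wrapc g.length p) = 1) :
    ∀ fuel (v : List (List Int)) (stack : List (Int × Int)) (S : Int × Int → Prop),
      shape g.length v →
      (∀ c, inb g.length c → (S c → cellv v c = 2) ∧ (¬ S c → cellv v c = cellv u c)) →
      (∀ c, S c → okCell g u c ∧ ReachF g u p 4 c) →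
      stack.Nodup →
      (∀ s ∈ stack, s = p ∨ S s) →
      (∀ c, (c = p ∨ S c) → c ∉ stack → ∀ i, i < 4 → okCell g u (nbr c i) → S (nbr c i)) →
      zGrid v + stack.length < fuel →
      ∀ c, inb g.length c →
        (ReachF g u p 4 c → cellv (bLoop fuel g (g.length : Int) v stack) c = 2) ∧
        (¬ ReachF g u p 4 c → cellv (bLoop fuel g (g.length : Int) v stack) c = cellv u c) := by
  intro fuel
  induction fuel with
  | zero => intro v stack S _ _ _ _ _ _ h; omega
  | succ fuel ih =>
      intro v stack S hs hchar hsound hnd hmem hclos hfuel c hc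
      match stack, hnd, hmem, hclos, hfuel with
      | [], hnd, hmem, hclos, hfuel =>
        have hunf : bLoop (fuel + 1) g (g.length : Int) v [] = v := by rw [bLoop]
        rw [hunf]
        have SR : ∀ c', ReachF g u p 4 c' → S c' := by
          intro c' h
          induction h with
          | base i hi hok => exact hclos p (Or.inl rfl) (by simp) i hi hok
          | step b i hi hb hok ih' => exact hclos b (Or.inr ih') (by simp) i hi hok
        constructor
        · intro hR
          exact (hchar c hc).1 (SR c hR)
        · intro hnR
          exact (hchar c hc).2 (fun hS => hnR (hsound c hS).2)
      | (qx, qy) :: rest, hnd, hmem, hclos, hfuel =>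
        have hq : (qx, qy) = p ∨ S (qx, qy) := hmem _ (List.mem_cons_self ..)
        have hB7 : ∀ i, i < 0 → okCell g u (nbr (qx, qy) i) → S (nbr (qx, qy) i) := by
          intro i hi; omega
        obtain ⟨S1, sub1, p1, q1, r1, n1, m1, c1, d1, e1⟩ :=
          stepB g u p hn hp hsu hwu (qx, qy) 0 (by omega) (zGrid v + rest.length)
            v rest S hq hs hchar hsound hnd (fun s hsm => hmem s (List.mem_cons_of_mem _ hsm))
            hclos hB7 (le_refl _)
        have et1 : bbody g (g.length : Int) (qx, qy).1 (qx, qy).2 (v, rest) 0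
            = bbody g (g.length : Int) qx qy (v, rest) 0 := rfl
        rw [et1] at p1 q1 n1 m1 c1 e1
        obtain ⟨S2, sub2, p2, q2, r2, n2, m2, c2, d2, e2⟩ :=
          stepB g u p hn hp hsu hwu (qx, qy) 1 (by omega) (zGrid v + rest.length)
            (bbody g (g.length : Int) qx qy (v, rest) 0).1
            (bbody g (g.length : Int) qx qy (v, rest) 0).2
            S1 (hq.imp id (sub1 _)) p1 q1 r1 n1 m1 c1 d1 e1
        have et2 : bbody g (g.length : Int) (qx, qy).1 (qx, qy).2
              ((bbody g (g.length : Int) qx qy (v, rest) 0).1, (bbody g (g.length : Int) qx qy (v, rest) 0).2) 1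
            = bbody g (g.length : Int) qx qy (bbody g (g.length : Int) qx qy (v, rest) 0) 1 := rfl
        rw [et2] at p2 q2 n2 m2 c2 e2
        obtain ⟨S3, sub3, p3, q3, r3, n3, m3, c3, d3, e3⟩ :=
          stepB g u p hn hp hsu hwu (qx, qy) 2 (by omega) (zGrid v + rest.length)
            (bbody g (g.length : Int) qx qy (bbody g (g.length : Int) qx qy (v, rest) 0) 1).1
            (bbody g (g.length : Int) qx qy (bbody g (g.length : Int) qx qy (v, rest) 0) 1).2
            S2 ((hq.imp id (sub1 _)).imp id (sub2 _)) p2 q2 r2 n2 m2 c2 d2 e2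
        have et3 : bbody g (g.length : Int) (qx, qy).1 (qx, qy).2
              ((bbody g (g.length : Int) qx qy (bbody g (g.length : Int) qx qy (v, rest) 0) 1).1,
               (bbody g (g.length : Int) qx qy (bbody g (g.length : Int) qx qy (v, rest) 0) 1).2) 2
            = bbody g (g.length : Int) qx qy (bbody g (g.length : Int) qx qy (bbody g (g.length : Int) qx qy (v, rest) 0) 1) 2 := rfl
        rw [et3] at p3 q3 n3 m3 c3 e3
        obtain ⟨S4, sub4, p4, q4, r4, n4, m4, c4, d4, e4⟩ :=
          stepB g u p hn hp hsu hwu (qx, qy) 3 (by omega) (zGrid v + rest.length)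
            (bbody g (g.length : Int) qx qy (bbody g (g.length : Int) qx qy (bbody g (g.length : Int) qx qy (v, rest) 0) 1) 2).1
            (bbody g (g.length : Int) qx qy (bbody g (g.length : Int) qx qy (bbody g (g.length : Int) qx qy (v, rest) 0) 1) 2).2
            S3 (((hq.imp id (sub1 _)).imp id (sub2 _)).imp id (sub3 _)) p3 q3 r3 n3 m3 c3 d3 e3
        have et4 : bbody g (g.length : Int) (qx, qy).1 (qx, qy).2
              ((bbody g (g.length : Int) qx qy (bbody g (g.length : Int) qx qy (bbody g (g.length : Int) qx qy (v, rest) 0) 1) 2).1,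
               (bbody g (g.length : Int) qx qy (bbody g (g.length : Int) qx qy (bbody g (g.length : Int) qx qy (v, rest) 0) 1) 2).2) 3
            = bbody g (g.length : Int) qx qy (bbody g (g.length : Int) qx qy (bbody g (g.length : Int) qx qy (bbody g (g.length : Int) qx qy (v, rest) 0) 1) 2) 3 := rfl
        rw [et4] at p4 q4 n4 m4 c4 e4
        have hunf : bLoop (fuel + 1) g (g.length : Int) v ((qx, qy) :: rest)
            = bLoop fuel g (g.length : Int)
                (bbody g (g.length : Int) qx qy (bbody g (g.length : Int) qx qy (bbody g (g.length : Int) qx qy (bbody g (g.length : Int) qx qy (v, rest) 0) 1) 2) 3).1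
                (bbody g (g.length : Int) qx qy (bbody g (g.length : Int) qx qy (bbody g (g.length : Int) qx qy (bbody g (g.length : Int) qx qy (v, rest) 0) 1) 2) 3).2 := by
          rw [bLoop]
          rfl
        rw [hunf]
        refine ih _ _ S4 p4 q4 r4 (List.Nodup.of_cons n4) m4 ?_ (by
          have h5 := hfuel
          simp only [List.length_cons] at h5
          omega) c hc
        intro c' hcp hcn i hi hoki
        by_cases hcq : c' = (qx, qy)
        · rw [hcq]
          exact d4 i hi (by rw [← hcq]; exact hoki)
        · exact c4 c' hcp (by
            intro hmem'
            rcases List.mem_cons.mp hmem' with h | h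
            · exact hcq h
            · exact hcn h) i hi hoki

theorem dfs_eq (graph visited : List (List Int)) (x y : Int)
    (hpre : Pre_dfs graph visited x y) : dfs graph visited x y = dfs_alt graph visited x y := by
  obtain ⟨_, _, hd⟩ := hpre
  by_cases h0 : (gget graph y x).getD 0 = 0
  · simp only [dfs, dfs_alt]
    rw [if_pos h0, if_pos h0]
  · obtain ⟨hvl, hgr, hvr, hx1, hx2, hy1, hy2, hn5⟩ := hd.resolve_left h0
    simp only [dfs, dfs_alt]
    rw [if_neg h0, if_neg h0]
    set n := graph.length with hndef
    have hn : 2 ≤ n := by omega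
    have hsv : shape n visited := ⟨hvl, hvr⟩
    have hp : validc n ((x, y) : Int × Int) := ⟨⟨hx1, hx2⟩, ⟨hy1, hy2⟩⟩
    have hg : cellv graph ((x, y) : Int × Int) ≠ 0 := h0
    set u := gset visited y x 1 with hu
    have hsu : shape n u := shape_gset 1 hsv hp.2 hp.1
    have hw_in : inb n (wrapc n (x, y)) := validc_wrap_inb hp
    have hwu : cellv u (wrapc n (x, y)) = 1 := by
      have e := cellv_gset (v := visited) (j := y) (i := x) 1 hsv hp.2 hp.1 hw_in
      rw [if_pos (show wrapc n (x, y) = wrapc n (x, y) from rfl)] at e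
      exact e
    have hzu : zGrid u ≤ zGrid visited := by
      apply zGrid_le_pointwise hsv hsu
      intro c hc hz
      have e := cellv_gset (v := visited) (j := y) (i := x) 1 hsv hp.2 hp.1 hc
      rw [← hu] at e
      by_cases hcw : c = wrapc n (x, y)
      · rw [if_pos hcw] at e; omega
      · rw [if_neg hcw] at e; omega
    have h44 : inb n ((4, 4) : Int × Int) := by
      refine ⟨by norm_num, ?_, by norm_num, ?_⟩ <;>
        (show (4 : Int) < (n : Int); exact_mod_cast (by omega : 4 < n))
    -- A side
    have hA := visit_spec graph hn (zGrid visited + 1) visited (x, y) hsv hp hg (by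
      have e : zGrid (gset visited ((x, y) : Int × Int).2 ((x, y) : Int × Int).1 1) = zGrid u := rfl
      omega)
    have hAc := hA.2 (4, 4) h44
    -- B side
    have hB := bloop_spec graph u (x, y) hn hp hsu hwu (zGrid visited + 2) u [(x, y)]
      (fun _ => False) hsu
      (fun c hc => ⟨fun h => h.elim, fun _ => rfl⟩)
      (fun c h => h.elim)
      (by simp)
      (fun s hs => Or.inl (List.mem_singleton.mp hs))
      (by
        intro c hcp hcn i hi hok
        rcases hcp with rfl | h
        · exact absurd (List.mem_singleton_self _) hcn
        · exact h.elim)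
      (by simp; omega)
      (4, 4) h44
    show cellv (dfsVisit (zGrid visited + 1) graph visited x y) ((4, 4) : Int × Int)
        = cellv (bLoop (zGrid visited + 2) graph (n : Int) u [(x, y)]) ((4, 4) : Int × Int)
    by_cases hcw : ((4, 4) : Int × Int) = wrapc n (x, y)
    · have hnR : ¬ ReachF graph u (x, y) 4 ((4, 4) : Int × Int) := by
        intro h
        have h2 := (reachF_ok h).2.2
        rw [hcw, hwu] at h2
        exact absurd h2 (by norm_num)
      rw [hAc.1 hcw, hB.2 hnR, hcw, hwu]
    · by_cases hR : ReachF graph u (x, y) 4 ((4, 4) : Int × Int)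
      · rw [hAc.2.1 hcw hR, hB.1 hR]
      · rw [hAc.2.2 hcw hR, hB.2 hR]

-- ===== VERDICT (by name: the statement is the Claim_ definition above) =====
theorem dfs_spec : Claim_equal_dfs := by
  intro graph visited x y _ hpre
  unfold Spec_dfs
  exact dfs_eq graph visited x y hpre
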